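-- pv_equiv track=rewrite | github.com/wolfcomes/RegRNA3.0 | RNA_Motif/G4Hunter/G4Hunter.py | BaseScore
-- ===== SOURCE A (Python) =====
-- def BaseScore(line):
--     item, liste = 0, []
--     while item < len(line):
--         if line[item] in "Gg":
--             liste.append(1)
--             if item+1 < len(line) and line[item+1] in "Gg":
--                 liste[item] = 2
--                 liste.append(2)
--                 if item+2 < len(line) and line[item+2] in "Gg":
--                     liste[item+1] = 3
--                     liste[item] = 3
--                     liste.append(3)
--                     if item+3 < len(line) and line[item+3] in "Gg":
--                         liste[item] = 4
--                         liste[item+1] = 4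
--                         liste[item+2] = 4
--                         liste.append(4)
--                         item += 1
--                     item += 1
--                 item += 1
--             item += 1
--             while item < len(line) and line[item] in "Gg":
--                 liste.append(4)
--                 item += 1
--         elif line[item] not in "GCgc":
--             liste.append(0)
--             item += 1
--         elif line[item] in "Cc":
--             liste.append(-1)
--             if item+1 < len(line) and line[item+1] in "Cc":
--                 liste[item] = -2
--                 liste.append(-2)
--                 if item+2 < len(line) and line[item+2] in "Cc":
--                     liste[item+1] = -3
--                     liste[item] = -3
--                     liste.append(-3)
--                     if item+3 < len(line) and line[item+3] in "Cc":
--                         liste[item] = -4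
--                         liste[item+1] = -4
--                         liste[item+2] = -4
--                         liste.append(-4)
--                         item += 1
--                     item += 1
--                 item += 1
--             item += 1
--             while item < len(line) and line[item] in "Cc":
--                 liste.append(-4)
--                 item += 1
--         else:
--             item += 1
--     return line, liste
-- ===== SOURCE B (Python) =====
-- from itertools import groupby
--
-- def _classify(ch):
--     return 'G' if ch in "Gg" else ('C' if ch in "Cc" else 'O')
--
-- def BaseScore(line):
--     liste = []
--     for key, grp in groupby(line, key=_classify):
--         L = sum(1 for _ in grp)
--         v = min(L, 4) if key == 'G' else (-min(L, 4) if key == 'C' else 0)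
--         liste.extend([v] * L)
--     return line, liste
-- ===== Notes on version B (the rewrite author's own statement) =====
-- stated objective: simpler
-- what changed: Replaces A's index-driven scan with nested 4-deep lookahead conditionals and in-place back-patching of earlier list entries by a single itertools.groupby run-length pass that emits min(len,4) (signed, or 0) once per maximal run.
import Mathlib
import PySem

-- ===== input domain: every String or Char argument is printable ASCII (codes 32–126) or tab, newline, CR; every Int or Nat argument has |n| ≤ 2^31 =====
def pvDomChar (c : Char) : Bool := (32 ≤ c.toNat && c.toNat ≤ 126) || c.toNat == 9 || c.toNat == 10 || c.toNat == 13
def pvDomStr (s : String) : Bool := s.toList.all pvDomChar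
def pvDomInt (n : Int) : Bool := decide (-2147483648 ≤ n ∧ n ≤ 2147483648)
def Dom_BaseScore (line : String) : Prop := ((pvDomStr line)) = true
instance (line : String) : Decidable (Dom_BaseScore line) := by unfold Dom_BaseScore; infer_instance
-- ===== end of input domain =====

-- B replaces A's nested lookahead-and-backpatch index scan by a clean run-length
-- grouping pass (itertools.groupby): simpler, same output.

-- ===== PORT A =====
-- `c in "Gg"` / `c in "Cc"`
def pgA (c : Char) : Bool := c == 'G' || c == 'g'
def pcA (c : Char) : Bool := c == 'C' || c == 'c'

-- the inner `while item < len(line) and line[item] in "Gg": liste.append(4); item += 1`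
-- (fuel = a totality guard; every call passes fuel = len(line), always enough)
def whileG (s : List Char) : Nat → Nat → List Int → Nat × List Int
  | 0, item, liste => (item, liste)
  | fuel + 1, item, liste =>
    if h : item < s.length then
      if pgA s[item] then whileG s fuel (item + 1) (liste ++ [4]) else (item, liste)
    else (item, liste)

-- the mirrored inner while for "Cc", appending -4
def whileC (s : List Char) : Nat → Nat → List Int → Nat × List Int
  | 0, item, liste => (item, liste)
  | fuel + 1, item, liste =>
    if h : item < s.length then
      if pcA s[item] then whileC s fuel (item + 1) (liste ++ [-4]) else (item, liste)
    else (item, liste)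

-- the nested lookahead/backpatch block of the G branch (after `liste.append(1)`);
-- returns the updated liste and the total increment applied to item
def stepG (s : List Char) (item : Nat) (liste : List Int) : List Int × Nat :=
  if item + 1 < s.length && pgA (s.getD (item + 1) ' ') then
    let liste := (liste.set item 2) ++ [2]
    if item + 2 < s.length && pgA (s.getD (item + 2) ' ') then
      let liste := ((liste.set (item + 1) 3).set item 3) ++ [3]
      if item + 3 < s.length && pgA (s.getD (item + 3) ' ') then
        ((((liste.set item 4).set (item + 1) 4).set (item + 2) 4) ++ [4], 4)
      else (liste, 3)
    else (liste, 2)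
  else (liste, 1)

-- the mirrored nested block of the C branch
def stepC (s : List Char) (item : Nat) (liste : List Int) : List Int × Nat :=
  if item + 1 < s.length && pcA (s.getD (item + 1) ' ') then
    let liste := (liste.set item (-2)) ++ [-2]
    if item + 2 < s.length && pcA (s.getD (item + 2) ' ') then
      let liste := ((liste.set (item + 1) (-3)).set item (-3)) ++ [-3]
      if item + 3 < s.length && pcA (s.getD (item + 3) ' ') then
        ((((liste.set item (-4)).set (item + 1) (-4)).set (item + 2) (-4)) ++ [-4], 4)
      else (liste, 3)
    else (liste, 2)
  else (liste, 1)

-- the outer `while item < len(line)` of A (fuel = a totality guard: item strictly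
-- increases each iteration, so fuel = len(line) is always enough)
def loopA (s : List Char) : Nat → Nat → List Int → List Int
  | 0, _, liste => liste
  | fuel + 1, item, liste =>
    if h : item < s.length then
      if pgA s[item] then
        let p := stepG s item (liste ++ [1])
        let q := whileG s s.length (item + p.2) p.1
        loopA s fuel q.1 q.2
      else if !(pgA s[item] || pcA s[item]) then
        loopA s fuel (item + 1) (liste ++ [0])
      else if pcA s[item] then
        let p := stepC s item (liste ++ [-1])
        let q := whileC s s.length (item + p.2) p.1
        loopA s fuel q.1 q.2
      else
        loopA s fuel (item + 1) liste   -- Python's final `else: item += 1` (unreachable)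
    else liste

def BaseScore (line : String) : String × List Int :=
  (line, loopA line.toList line.toList.length 0 [])

-- ===== PORT B =====
-- B's groupby key: 'G' / 'C' / 'O'
def classify (c : Char) : Char :=
  if c == 'G' || c == 'g' then 'G' else if c == 'C' || c == 'c' then 'C' else 'O'

-- the per-run score B emits: min(L,4), signed for C, 0 for other characters
def scoreB (k : Char) (L : Nat) : Int :=
  if k == 'G' then ((min L 4 : Nat) : Int)
  else if k == 'C' then -((min L 4 : Nat) : Int)
  else 0

-- itertools.groupby, streamed: goB carries the current group's key and run length
def goB (k : Char) : Nat → List Char → List Int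
  | L, [] => List.replicate L (scoreB k L)
  | L, d :: rest =>
    if classify d == k then goB k (L + 1) rest
    else List.replicate L (scoreB k L) ++ goB (classify d) 1 rest

def runsB : List Char → List Int
  | [] => []
  | c :: rest => goB (classify c) 1 rest

def BaseScore_alt (line : String) : String × List Int := (line, runsB line.toList)

-- ===== PRECONDITION & SPEC =====
def Spec_BaseScore (line : String) (out : String × List Int) : Prop := out = BaseScore_alt line
instance (line : String) (out : String × List Int) : Decidable (Spec_BaseScore line out) := by unfold Spec_BaseScore; infer_instance

-- ===== CLAIM (what is proved, stated in full; the proofs are below) =====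
def Claim_equal_BaseScore : Prop := ∀ (line : String), Dom_BaseScore line → Spec_BaseScore line (BaseScore line)

-- ===== LEMMAS AND PROOFS =====

-- evaluate List.set at / just past the length of a prefix
theorem setH (acc : List Int) (a v : Int) (t : List Int) :
    (acc ++ a :: t).set acc.length v = acc ++ v :: t := by
  rw [List.set_append_right _ _ (le_refl _)]; simp

theorem setH1 (acc : List Int) (a b v : Int) (t : List Int) :
    (acc ++ a :: b :: t).set (acc.length + 1) v = acc ++ a :: v :: t := by
  rw [List.set_append_right _ _ (by omega)]; simp

theorem setH2 (acc : List Int) (a b c v : Int) (t : List Int) :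
    (acc ++ a :: b :: c :: t).set (acc.length + 2) v = acc ++ a :: b :: v :: t := by
  rw [List.set_append_right _ _ (by omega)]; simp

theorem getD_drop (s : List Char) (i k : Nat) :
    (s.drop i).getD k ' ' = s.getD (i + k) ' ' := by
  simp [List.getD, List.getElem?_drop]

theorem dropWhile_eq_drop (p : Char → Bool) (l : List Char) :
    l.dropWhile p = l.drop (l.takeWhile p).length := by
  induction l with
  | nil => rfl
  | cons a t ih => by_cases h : p a <;> simp [h, ih]

theorem whileG_spec (s : List Char) : ∀ (fuel item : Nat) (liste : List Int),
    s.length ≤ item + fuel →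
    whileG s fuel item liste =
      (item + ((s.drop item).takeWhile pgA).length,
       liste ++ List.replicate ((s.drop item).takeWhile pgA).length 4) := by
  intro fuel
  induction fuel with
  | zero =>
    intro item liste h
    rw [whileG, List.drop_of_length_le (by omega)]
    simp
  | succ fuel ih =>
    intro item liste h
    rw [whileG]
    by_cases hi : item < s.length
    · rw [dif_pos hi]
      by_cases hg : pgA s[item] = true
      · rw [if_pos hg, ih (item + 1) (liste ++ [4]) (by omega)]
        have ht : (s.drop item).takeWhile pgA = s[item] :: (s.drop (item + 1)).takeWhile pgA := by
          rw [List.drop_eq_getElem_cons hi]; simp only [List.takeWhile_cons, hg, if_pos]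
        rw [ht, Prod.mk.injEq]
        refine ⟨by simp; omega, ?_⟩
        simp [List.replicate_succ]
      · rw [if_neg hg]
        have ht : (s.drop item).takeWhile pgA = [] := by
          rw [List.drop_eq_getElem_cons hi]; simp [hg]
        simp [ht]
    · rw [dif_neg hi, List.drop_of_length_le (by omega)]
      simp

theorem whileC_spec (s : List Char) : ∀ (fuel item : Nat) (liste : List Int),
    s.length ≤ item + fuel →
    whileC s fuel item liste =
      (item + ((s.drop item).takeWhile pcA).length,
       liste ++ List.replicate ((s.drop item).takeWhile pcA).length (-4)) := by
  intro fuel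
  induction fuel with
  | zero =>
    intro item liste h
    rw [whileC, List.drop_of_length_le (by omega)]
    simp
  | succ fuel ih =>
    intro item liste h
    rw [whileC]
    by_cases hi : item < s.length
    · rw [dif_pos hi]
      by_cases hg : pcA s[item] = true
      · rw [if_pos hg, ih (item + 1) (liste ++ [-4]) (by omega)]
        have ht : (s.drop item).takeWhile pcA = s[item] :: (s.drop (item + 1)).takeWhile pcA := by
          rw [List.drop_eq_getElem_cons hi]; simp only [List.takeWhile_cons, hg, if_pos]
        rw [ht, Prod.mk.injEq]
        refine ⟨by simp; omega, ?_⟩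
        simp [List.replicate_succ]
      · rw [if_neg hg]
        have ht : (s.drop item).takeWhile pcA = [] := by
          rw [List.drop_eq_getElem_cons hi]; simp [hg]
        simp [ht]
    · rw [dif_neg hi, List.drop_of_length_le (by omega)]
      simp

-- the form in which loopA invokes the inner whiles (fuel = len(line) is always enough)
theorem whileG_run (s : List Char) (item : Nat) (liste : List Int) :
    whileG s s.length item liste =
      (item + ((s.drop item).takeWhile pgA).length,
       liste ++ List.replicate ((s.drop item).takeWhile pgA).length 4) :=
  whileG_spec s s.length item liste (by omega)

theorem whileC_run (s : List Char) (item : Nat) (liste : List Int) :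
    whileC s s.length item liste =
      (item + ((s.drop item).takeWhile pcA).length,
       liste ++ List.replicate ((s.drop item).takeWhile pcA).length (-4)) :=
  whileC_spec s s.length item liste (by omega)

theorem classify_eq_G {c : Char} (h : pgA c = true) : classify c = 'G' := by
  unfold pgA at h; unfold classify; simp [h]

theorem classify_eq_C {c : Char} (hg : pgA c = false) (hc : pcA c = true) :
    classify c = 'C' := by
  unfold pgA at hg; unfold pcA at hc; unfold classify; simp [hg, hc]

theorem classify_eq_O {c : Char} (hg : pgA c = false) (hc : pcA c = false) :
    classify c = 'O' := by
  unfold pgA at hg; unfold pcA at hc; unfold classify; simp [hg, hc]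

theorem pg_pc {d : Char} (h : pgA d = true) : pcA d = false := by
  unfold pgA at h; unfold pcA
  rcases (by simpa using h : d = 'G' ∨ d = 'g') with rfl | rfl <;> decide

theorem pred_G {c : Char} (h : pgA c = true) :
    (fun d => classify d == classify c) = pgA := by
  funext d; rw [classify_eq_G h]
  cases hd : pgA d with
  | false =>
    cases hc : pcA d with
    | false => rw [classify_eq_O hd hc]; decide
    | true => rw [classify_eq_C hd hc]; decide
  | true => rw [classify_eq_G hd]; decide

theorem pred_C {c : Char} (hg : pgA c = false) (hc : pcA c = true) :
    (fun d => classify d == classify c) = pcA := by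
  funext d; rw [classify_eq_C hg hc]
  cases hd : pgA d with
  | false =>
    cases hd2 : pcA d with
    | false => rw [classify_eq_O hd hd2]; decide
    | true => rw [classify_eq_C hd hd2]; decide
  | true => rw [classify_eq_G hd, pg_pc hd]; decide

theorem goB_spec (k : Char) : ∀ (rest : List Char) (L : Nat),
    goB k L rest =
      List.replicate (L + (rest.takeWhile (fun d => classify d == k)).length)
        (scoreB k (L + (rest.takeWhile (fun d => classify d == k)).length))
      ++ runsB (rest.dropWhile (fun d => classify d == k)) := by
  intro rest
  induction rest with
  | nil => intro L; simp [goB, runsB]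
  | cons d rest ih =>
    intro L
    rw [goB]
    by_cases hd : (classify d == k) = true
    · rw [if_pos hd, ih (L + 1)]
      simp only [List.takeWhile_cons, List.dropWhile_cons, hd, if_pos, List.length_cons]
      rw [show L + 1 + (rest.takeWhile (fun d => classify d == k)).length
            = L + ((rest.takeWhile (fun d => classify d == k)).length + 1) from by omega]
    · rw [if_neg hd]
      have htw : (d :: rest).takeWhile (fun d => classify d == k) = [] := by
        simp [hd]
      have hdw : (d :: rest).dropWhile (fun d => classify d == k) = d :: rest := by
        simp [hd]
      rw [htw, hdw, runsB]
      simp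

theorem runsB_cons (c : Char) (rest : List Char) :
    runsB (c :: rest) =
      List.replicate ((rest.takeWhile (fun d => classify d == classify c)).length + 1)
        (scoreB (classify c) ((rest.takeWhile (fun d => classify d == classify c)).length + 1))
      ++ runsB (rest.dropWhile (fun d => classify d == classify c)) := by
  rw [runsB, goB_spec]
  rw [show 1 + (rest.takeWhile (fun d => classify d == classify c)).length
        = (rest.takeWhile (fun d => classify d == classify c)).length + 1 from by omega]

theorem runsB_G {c : Char} (rest : List Char) (h : pgA c = true) :
    runsB (c :: rest) =
      List.replicate ((rest.takeWhile pgA).length + 1)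
        ((min ((rest.takeWhile pgA).length + 1) 4 : Nat) : Int)
      ++ runsB (rest.dropWhile pgA) := by
  rw [runsB_cons, pred_G h, classify_eq_G h]; simp [scoreB]

theorem runsB_C {c : Char} (rest : List Char) (hg : pgA c = false) (hc : pcA c = true) :
    runsB (c :: rest) =
      List.replicate ((rest.takeWhile pcA).length + 1)
        (-((min ((rest.takeWhile pcA).length + 1) 4 : Nat) : Int))
      ++ runsB (rest.dropWhile pcA) := by
  rw [runsB_cons, pred_C hg hc, classify_eq_C hg hc]; simp [scoreB]

theorem runsB_O {c : Char} (rest : List Char) (hg : pgA c = false) (hc : pcA c = false) :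
    runsB (c :: rest) = 0 :: runsB rest := by
  rw [runsB_cons, classify_eq_O hg hc]
  have hsc : ∀ L, scoreB 'O' L = 0 := by intro L; simp [scoreB]
  rw [hsc]
  cases rest with
  | nil => simp [runsB]
  | cons r rs =>
    cases hr : (classify r == 'O') with
    | false => simp [hr, List.replicate_succ]
    | true =>
      have hcr : classify r = 'O' := by simpa using hr
      conv_rhs => rw [runsB_cons, hcr, hsc]
      simp [hcr, List.replicate_succ]

theorem replicate_add_four (k : Nat) (v : Int) :
    List.replicate (k + 4) v = v :: v :: v :: v :: List.replicate k v := by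
  have e : k + 4 = (((k + 1) + 1) + 1) + 1 := by omega
  rw [e, List.replicate_succ, List.replicate_succ, List.replicate_succ, List.replicate_succ]

theorem G_branch (s : List Char) (acc : List Int) (h : acc.length < s.length) :
    whileG s s.length (acc.length + (stepG s acc.length (acc ++ [1])).2)
      (stepG s acc.length (acc ++ [1])).1
    = (acc.length + (((s.drop (acc.length + 1)).takeWhile pgA).length + 1),
       acc ++ List.replicate (((s.drop (acc.length + 1)).takeWhile pgA).length + 1)
         ((min (((s.drop (acc.length + 1)).takeWhile pgA).length + 1) 4 : Nat) : Int)) := by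
  rcases hr : s.drop (acc.length + 1) with _ | ⟨a, t1⟩
  · have hl : s.length ≤ acc.length + 1 := by
      have := congrArg List.length hr; simp at this; omega
    have hc1 : ¬ (acc.length + 1 < s.length) := by omega
    simp only [stepG, hc1, decide_false, Bool.false_and, Bool.false_eq_true, if_false]
    rw [whileG_run, hr]
    simp [List.replicate_succ]
  · have hlen1 : s.length = acc.length + 1 + (t1.length + 1) := by
      have := congrArg List.length hr; simp at this; omega
    have e1 : s.getD (acc.length + 1) ' ' = a := by
      have h0 := getD_drop s (acc.length + 1) 0; rw [hr] at h0; simpa using h0.symm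
    have hm1 : acc.length + 1 < s.length := by omega
    have hd2 : s.drop (acc.length + 1 + 1) = t1 := by
      rw [← List.drop_drop, hr]; rfl
    by_cases ha : pgA a = true
    · rcases t1 with _ | ⟨b, t2⟩
      · simp only [List.length_nil] at hlen1 -- run is exactly [a]
        have hc2 : ¬ (acc.length + 2 < s.length) := by omega
        simp only [stepG, e1, ha, hm1, hc2]
        rw [if_pos (by simp []), if_neg (by simp [hc2])]
        rw [setH acc 1 2 []]
        rw [whileG_run]
        rw [show acc.length + 2 = acc.length + 1 + 1 from rfl, hd2]
        simp [ha, List.replicate_succ]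
      · have e2 : s.getD (acc.length + 2) ' ' = b := by
          have h0 := getD_drop s (acc.length + 1) 1; rw [hr] at h0
          rw [show acc.length + 2 = acc.length + 1 + 1 from rfl]
          simpa using h0.symm
        have hm2 : acc.length + 2 < s.length := by
          simp only [List.length_cons] at hlen1; omega
        have hd3 : s.drop (acc.length + 2 + 1) = t2 := by
          rw [← List.drop_drop, hd2]; rfl
        by_cases hb : pgA b = true
        · rcases t2 with _ | ⟨cc, t3⟩
          · simp only [List.length_nil, List.length_cons] at hlen1 -- run is [a, b]
            have hc3 : ¬ (acc.length + 3 < s.length) := by omega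
            simp only [stepG, e1, e2, ha, hb, hm1, hm2, hc3]
            rw [if_pos (by simp []), if_pos (by simp []),
                if_neg (by simp [hc3])]
            rw [setH acc 1 2 []]
            simp only [List.append_assoc, List.cons_append, List.nil_append]
            rw [setH1 acc 2 2 3 [], setH acc 2 3 [3]]
            rw [whileG_run]
            rw [show acc.length + 3 = acc.length + 2 + 1 from rfl, hd3]
            simp [ha, hb, List.replicate_succ]
          · have e3 : s.getD (acc.length + 3) ' ' = cc := by
              have h0 := getD_drop s (acc.length + 1) 2; rw [hr] at h0
              rw [show acc.length + 3 = acc.length + 1 + 2 from rfl]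
              simpa using h0.symm
            have hm3 : acc.length + 3 < s.length := by
              simp only [List.length_cons] at hlen1; omega
            have hd4 : s.drop (acc.length + 3 + 1) = t3 := by
              rw [← List.drop_drop, hd3]; rfl
            by_cases hcc : pgA cc = true
            · -- run is [a, b, cc, …]
              simp only [stepG, e1, e2, e3, ha, hb, hcc, hm1, hm2, hm3]
              rw [if_pos (by simp []), if_pos (by simp []),
                  if_pos (by simp [])]
              rw [setH acc 1 2 []]
              simp only [List.append_assoc, List.cons_append, List.nil_append]
              rw [setH1 acc 2 2 3 [], setH acc 2 3 [3]]
              simp only [List.append_assoc, List.cons_append, List.nil_append]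
              rw [setH acc 3 4 [3, 3], setH1 acc 4 3 4 [3], setH2 acc 4 4 3 4 []]
              rw [whileG_run]
              rw [show acc.length + 4 = acc.length + 3 + 1 from rfl, hd4]
              simp only [List.takeWhile_cons, ha, hb, hcc, if_pos, List.length_cons]
              rw [Prod.mk.injEq]
              constructor
              · omega
              · have hmin : min ((t3.takeWhile pgA).length + 1 + 1 + 1 + 1) 4 = 4 := by omega
                rw [hmin,
                    show (t3.takeWhile pgA).length + 1 + 1 + 1 + 1
                       = (t3.takeWhile pgA).length + 4 from rfl,
                    replicate_add_four]
                simp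
            · -- run is [a, b]; cc breaks it
              simp only [stepG, e1, e2, e3, ha, hb, hcc, hm1, hm2, hm3]
              rw [if_pos (by simp []), if_pos (by simp []),
                  if_neg (by simp [])]
              rw [setH acc 1 2 []]
              simp only [List.append_assoc, List.cons_append, List.nil_append]
              rw [setH1 acc 2 2 3 [], setH acc 2 3 [3]]
              rw [whileG_run]
              rw [show acc.length + 3 = acc.length + 2 + 1 from rfl, hd3]
              simp [ha, hb, hcc, List.replicate_succ]
        · -- run is [a]; b breaks it
          simp only [stepG, e1, e2, ha, hb, hm1, hm2]
          rw [if_pos (by simp []), if_neg (by simp [])]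
          rw [setH acc 1 2 []]
          rw [whileG_run]
          rw [show acc.length + 2 = acc.length + 1 + 1 from rfl, hd2]
          simp [ha, hb, List.replicate_succ]
    · -- the char after the head already breaks the run
      simp only [stepG, e1, ha, hm1]
      rw [if_neg (by simp [])]
      rw [whileG_run, hr]
      simp [ha, List.replicate_succ]

theorem C_branch (s : List Char) (acc : List Int) (h : acc.length < s.length) :
    whileC s s.length (acc.length + (stepC s acc.length (acc ++ [-1])).2)
      (stepC s acc.length (acc ++ [-1])).1
    = (acc.length + (((s.drop (acc.length + 1)).takeWhile pcA).length + 1),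
       acc ++ List.replicate (((s.drop (acc.length + 1)).takeWhile pcA).length + 1)
         (-((min (((s.drop (acc.length + 1)).takeWhile pcA).length + 1) 4 : Nat) : Int))) := by
  rcases hr : s.drop (acc.length + 1) with _ | ⟨a, t1⟩
  · have hl : s.length ≤ acc.length + 1 := by
      have := congrArg List.length hr; simp at this; omega
    have hc1 : ¬ (acc.length + 1 < s.length) := by omega
    simp only [stepC, hc1, decide_false, Bool.false_and, Bool.false_eq_true, if_false]
    rw [whileC_run, hr]
    simp [List.replicate_succ]
  · have hlen1 : s.length = acc.length + 1 + (t1.length + 1) := by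
      have := congrArg List.length hr; simp at this; omega
    have e1 : s.getD (acc.length + 1) ' ' = a := by
      have h0 := getD_drop s (acc.length + 1) 0; rw [hr] at h0; simpa using h0.symm
    have hm1 : acc.length + 1 < s.length := by omega
    have hd2 : s.drop (acc.length + 1 + 1) = t1 := by
      rw [← List.drop_drop, hr]; rfl
    by_cases ha : pcA a = true
    · rcases t1 with _ | ⟨b, t2⟩
      · simp only [List.length_nil] at hlen1 -- run is exactly [a]
        have hc2 : ¬ (acc.length + 2 < s.length) := by omega
        simp only [stepC, e1, ha, hm1, hc2]
        rw [if_pos (by simp []), if_neg (by simp [hc2])]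
        rw [setH acc (-1) (-2) []]
        rw [whileC_run]
        rw [show acc.length + 2 = acc.length + 1 + 1 from rfl, hd2]
        simp [ha, List.replicate_succ]
      · have e2 : s.getD (acc.length + 2) ' ' = b := by
          have h0 := getD_drop s (acc.length + 1) 1; rw [hr] at h0
          rw [show acc.length + 2 = acc.length + 1 + 1 from rfl]
          simpa using h0.symm
        have hm2 : acc.length + 2 < s.length := by
          simp only [List.length_cons] at hlen1; omega
        have hd3 : s.drop (acc.length + 2 + 1) = t2 := by
          rw [← List.drop_drop, hd2]; rfl
        by_cases hb : pcA b = true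
        · rcases t2 with _ | ⟨cc, t3⟩
          · simp only [List.length_nil, List.length_cons] at hlen1 -- run is [a, b]
            have hc3 : ¬ (acc.length + 3 < s.length) := by omega
            simp only [stepC, e1, e2, ha, hb, hm1, hm2, hc3]
            rw [if_pos (by simp []), if_pos (by simp []),
                if_neg (by simp [hc3])]
            rw [setH acc (-1) (-2) []]
            simp only [List.append_assoc, List.cons_append, List.nil_append]
            rw [setH1 acc (-2) (-2) (-3) [], setH acc (-2) (-3) [-3]]
            rw [whileC_run]
            rw [show acc.length + 3 = acc.length + 2 + 1 from rfl, hd3]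
            simp [ha, hb, List.replicate_succ]
          · have e3 : s.getD (acc.length + 3) ' ' = cc := by
              have h0 := getD_drop s (acc.length + 1) 2; rw [hr] at h0
              rw [show acc.length + 3 = acc.length + 1 + 2 from rfl]
              simpa using h0.symm
            have hm3 : acc.length + 3 < s.length := by
              simp only [List.length_cons] at hlen1; omega
            have hd4 : s.drop (acc.length + 3 + 1) = t3 := by
              rw [← List.drop_drop, hd3]; rfl
            by_cases hcc : pcA cc = true
            · -- run is [a, b, cc, …]
              simp only [stepC, e1, e2, e3, ha, hb, hcc, hm1, hm2, hm3]
              rw [if_pos (by simp []), if_pos (by simp []),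
                  if_pos (by simp [])]
              rw [setH acc (-1) (-2) []]
              simp only [List.append_assoc, List.cons_append, List.nil_append]
              rw [setH1 acc (-2) (-2) (-3) [], setH acc (-2) (-3) [-3]]
              simp only [List.append_assoc, List.cons_append, List.nil_append]
              rw [setH acc (-3) (-4) [-3, -3], setH1 acc (-4) (-3) (-4) [-3], setH2 acc (-4) (-4) (-3) (-4) []]
              rw [whileC_run]
              rw [show acc.length + 4 = acc.length + 3 + 1 from rfl, hd4]
              simp only [List.takeWhile_cons, ha, hb, hcc, if_pos, List.length_cons]
              rw [Prod.mk.injEq]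
              constructor
              · omega
              · have hmin : min ((t3.takeWhile pcA).length + 1 + 1 + 1 + 1) 4 = 4 := by omega
                rw [hmin,
                    show (t3.takeWhile pcA).length + 1 + 1 + 1 + 1
                       = (t3.takeWhile pcA).length + 4 from rfl,
                    replicate_add_four]
                simp
            · -- run is [a, b]; cc breaks it
              simp only [stepC, e1, e2, e3, ha, hb, hcc, hm1, hm2, hm3]
              rw [if_pos (by simp []), if_pos (by simp []),
                  if_neg (by simp [])]
              rw [setH acc (-1) (-2) []]
              simp only [List.append_assoc, List.cons_append, List.nil_append]
              rw [setH1 acc (-2) (-2) (-3) [], setH acc (-2) (-3) [-3]]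
              rw [whileC_run]
              rw [show acc.length + 3 = acc.length + 2 + 1 from rfl, hd3]
              simp [ha, hb, hcc, List.replicate_succ]
        · -- run is [a]; b breaks it
          simp only [stepC, e1, e2, ha, hb, hm1, hm2]
          rw [if_pos (by simp []), if_neg (by simp [])]
          rw [setH acc (-1) (-2) []]
          rw [whileC_run]
          rw [show acc.length + 2 = acc.length + 1 + 1 from rfl, hd2]
          simp [ha, hb, List.replicate_succ]
    · -- the char after the head already breaks the run
      simp only [stepC, e1, ha, hm1]
      rw [if_neg (by simp [])]
      rw [whileC_run, hr]
      simp [ha, List.replicate_succ]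


theorem main_loop (s : List Char) : ∀ (fuel item : Nat) (acc : List Int),
    s.length ≤ item + fuel → acc.length = item →
    loopA s fuel item acc = acc ++ runsB (s.drop item) := by
  intro fuel
  induction fuel with
  | zero =>
    intro item acc h hl
    rw [loopA, List.drop_of_length_le (by omega)]
    simp [runsB]
  | succ n ih =>
    intro item acc h hl
    subst hl
    by_cases hi : acc.length < s.length
    · rw [List.drop_eq_getElem_cons hi]
      by_cases hg : pgA (s[acc.length]'hi) = true
      · -- G branch: consume the whole G run
        rw [loopA]
        simp only [hi, dif_pos, hg, if_pos]
        rw [G_branch s acc hi]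
        dsimp only
        rw [ih _ _ (by omega) (by simp)]
        rw [runsB_G _ hg, dropWhile_eq_drop, List.drop_drop]
        rw [show acc.length + 1 + ((s.drop (acc.length + 1)).takeWhile pgA).length
              = acc.length + (((s.drop (acc.length + 1)).takeWhile pgA).length + 1) from by omega]
        simp [List.append_assoc]
      · by_cases hc : pcA (s[acc.length]'hi) = true
        · -- C branch: consume the whole C run
          rw [loopA]
          simp only [hi, dif_pos, hg, hc, Bool.false_eq_true, if_false, Bool.false_or,
            Bool.not_true, if_pos]
          rw [C_branch s acc hi]
          dsimp only
          rw [ih _ _ (by omega) (by simp)]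
          rw [runsB_C _ (by simpa using hg) hc, dropWhile_eq_drop, List.drop_drop]
          rw [show acc.length + 1 + ((s.drop (acc.length + 1)).takeWhile pcA).length
                = acc.length + (((s.drop (acc.length + 1)).takeWhile pcA).length + 1) from by omega]
          simp [List.append_assoc]
        · -- other characters: one step, score 0
          rw [loopA]
          simp only [hi, dif_pos, hg, hc, Bool.false_eq_true, if_false, Bool.false_or,
            Bool.not_false, if_pos]
          rw [ih _ _ (by omega) (by simp)]
          rw [runsB_O _ (by simpa using hg) (by simpa using hc)]
          simp
    · rw [loopA, dif_neg hi, List.drop_of_length_le (by omega)]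
      simp [runsB]

-- ===== VERDICT (by name: the statement is the Claim_ definition above) =====
theorem BaseScore_spec : Claim_equal_BaseScore := by
  intro line _
  unfold Spec_BaseScore BaseScore BaseScore_alt
  rw [main_loop line.toList line.toList.length 0 [] (by omega) rfl]
  simp
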